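-- pv_equiv track=rewrite | github.com/wes-novack/adventofcode | 2018/day5/puzzle2.py | reduce_polymer
-- ===== SOURCE A (Python) =====
-- def reduce_polymer(polymer):
--     list_polymer = list(polymer)
--     should_iterate = True
--     elements_to_delete = []
--     while should_iterate:
--         for (element, char) in enumerate(list_polymer):
--             max_index = len(list_polymer) - 1
--             if element >= max_index:
--                 break
--             next_element = element + 1
--             next_char = list_polymer[next_element]
--             if char.lower() == next_char.lower() and char != next_char:
--                 if element - 1 not in elements_to_delete:
--                     elements_to_delete.append(element)
--                     elements_to_delete.append(next_element)
--         if elements_to_delete: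
--             list_polymer = delete_chars(elements_to_delete, list_polymer)
--             elements_to_delete = []
--         else:
--             should_iterate = False
--     reduced_polymer = ''.join(list_polymer)
--     return reduced_polymer
--
-- def delete_chars(elements_to_delete, polymer):
--     elements_to_delete.reverse()
--     polymer = list(polymer)
--     for element in elements_to_delete:
--         polymer.pop(element)
--     return polymer
-- ===== SOURCE B (Python) =====
-- def reduce_polymer(polymer):
--     stack = []
--     for ch in polymer:
--         if stack and stack[-1] != ch and stack[-1].lower() == ch.lower():
--             stack.pop()
--         else:
--             stack.append(ch)
--     return ''.join(stack)
-- ===== Notes on version B (the rewrite author's own statement) =====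
-- stated objective: faster
-- what changed: Replaces A's repeated scan-collect-delete passes over the whole list with a single left-to-right pass maintaining a stack that pops when the incoming character annihilates the top.
import Mathlib
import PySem

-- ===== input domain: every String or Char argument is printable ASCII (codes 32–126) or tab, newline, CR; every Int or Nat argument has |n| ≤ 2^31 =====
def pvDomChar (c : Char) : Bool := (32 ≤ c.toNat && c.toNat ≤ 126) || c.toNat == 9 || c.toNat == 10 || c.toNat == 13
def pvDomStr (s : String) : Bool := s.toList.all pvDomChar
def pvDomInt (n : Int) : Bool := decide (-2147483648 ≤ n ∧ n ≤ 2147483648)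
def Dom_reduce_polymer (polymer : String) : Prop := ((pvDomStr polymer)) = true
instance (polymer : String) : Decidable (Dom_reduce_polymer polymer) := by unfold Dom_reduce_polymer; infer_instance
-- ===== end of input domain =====

-- B replaces A's repeated scan/collect/delete passes by one linear pass with a stack
-- (push each character, pop when it annihilates the top); same return value, proved below.


-- ===== PORT A =====
-- A's reaction test: char.lower() == next_char.lower() and char != next_char
def pvReactB (c d : Char) : Bool :=
  (PySem.Chars.lowerChar c == PySem.Chars.lowerChar d) && (c != d)

-- the 'for (element, char) in enumerate(list_polymer)' loop of A, with its break
def pvGo (lp : List Char) : List (Int × Char) → List Int → List Int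
  | [], dels => dels
  | (i, c) :: rest, dels =>
    if i ≥ (lp.length : Int) - 1 then dels          -- break
    else
      match PySem.List.pyGet? lp (i + 1) with
      | none => dels                                 -- unreachable: i + 1 < len(lp)
      | some nc =>
        if pvReactB c nc then
          if !(dels.contains (i - 1)) then pvGo lp rest (dels ++ [i, i + 1])
          else pvGo lp rest dels
        else pvGo lp rest dels

-- delete_chars: reverse the index list, pop each index
def pvDeleteChars (dels : List Int) (lp : List Char) : List Char :=
  dels.reverse.foldl (fun p e =>
    match PySem.List.pop? p e with
    | some r => r.2
    | none => p) lp                                  -- none unreachable: Python's pop never raises here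

-- the while-loop of A; the fuel argument only makes the recursion structural (each deleting
-- iteration strictly shortens the list — proved below — so fuel len+1 is never exhausted)
def pvCore : Nat → List Char → List Char
  | 0, lp => lp
  | fuel + 1, lp =>
    let dels := pvGo lp (PySem.List.enumerate lp) []
    if dels.isEmpty then lp
    else pvCore fuel (pvDeleteChars dels lp)

def reduce_polymer (polymer : String) : String :=
  String.ofList (pvCore (polymer.toList.length + 1) polymer.toList)   -- ''.join(list_polymer)

-- ===== PORT B =====
-- one step of B's loop body: pop the reacting top, else push
def pvPush (stack : List Char) (ch : Char) : List Char :=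
  match stack with
  | top :: rest =>
      if top != ch && (PySem.Chars.lowerChar top == PySem.Chars.lowerChar ch) then rest
      else ch :: top :: rest
  | [] => [ch]

def reduce_polymer_alt (polymer : String) : String :=
  String.ofList ((polymer.toList.foldl pvPush []).reverse)   -- stack top kept at the head; ''.join(stack)

-- ===== PRECONDITION & SPEC =====
def Spec_reduce_polymer (polymer : String) (out : String) : Prop := out = reduce_polymer_alt polymer
instance (polymer : String) (out : String) : Decidable (Spec_reduce_polymer polymer out) := by unfold Spec_reduce_polymer; infer_instance

-- ===== CLAIM (what is proved, stated in full; the proofs are below) =====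
def Claim_equal_reduce_polymer : Prop := ∀ (polymer : String), Dom_reduce_polymer polymer → Spec_reduce_polymer polymer (reduce_polymer polymer)

-- ===== LEMMAS AND PROOFS =====
-- equation helpers for the two shapes of a pvGo step
lemma pvGo_break (lp : List Char) (i : Int) (c : Char) (rest : List (Int × Char)) (dels : List Int)
    (h : i ≥ (lp.length : Int) - 1) : pvGo lp ((i, c) :: rest) dels = dels := by
  rw [pvGo, if_pos h]

lemma pvGo_step (lp : List Char) (i : Int) (c nc : Char) (rest : List (Int × Char)) (dels : List Int)
    (h : ¬ i ≥ (lp.length : Int) - 1) (hg : PySem.List.pyGet? lp (i + 1) = some nc) :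
    pvGo lp ((i, c) :: rest) dels =
      if pvReactB c nc then
        (if !(dels.contains (i - 1)) then pvGo lp rest (dels ++ [i, i + 1])
         else pvGo lp rest dels)
      else pvGo lp rest dels := by
  rw [pvGo, if_neg h, hg]

-- what one collect+delete pass of A does, expressed structurally (proof device)
def pvPass : Bool → List Char → List Char
  | _, [] => []
  | _, [c] => [c]
  | true, c :: d :: t => c :: pvPass false (d :: t)
  | false, c :: d :: t =>
      if pvReactB c d then pvPass true t else c :: pvPass false (d :: t)
termination_by _ l => l.length

def PvChain (l : List Char) : Prop := List.IsChain (fun a b => pvReactB a b = false) l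

lemma pvPass_eq_or_lt : ∀ (b : Bool) (l : List Char),
    pvPass b l = l ∨ (pvPass b l).length < l.length := by
  intro b l
  induction b, l using pvPass.induct with
  | case1 b => simp [pvPass]
  | case2 b c => simp [pvPass]
  | case3 c d t ih =>
    rw [pvPass]
    rcases ih with h | h
    · exact Or.inl (by rw [h])
    · exact Or.inr (by simpa using Nat.succ_lt_succ h)
  | case4 c d t hr ih =>
    rw [pvPass, if_pos hr]
    rcases ih with h | h
    · exact Or.inr (by simp [h])
    · exact Or.inr (by simp; omega)
  | case5 c d t hr ih =>
    rw [pvPass, if_neg hr]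
    rcases ih with h | h
    · exact Or.inl (by rw [h])
    · exact Or.inr (by simpa using Nat.succ_lt_succ h)

lemma pvPass_length (b : Bool) (l : List Char) : (pvPass b l).length ≤ l.length := by
  rcases pvPass_eq_or_lt b l with h | h
  · rw [h]
  · exact Nat.le_of_lt h

lemma pvPass_fix : ∀ (l : List Char), pvPass false l = l → PvChain l := by
  have H : ∀ (b : Bool) (l : List Char), pvPass b l = l → b = false → PvChain l := by
    intro b l
    induction b, l using pvPass.induct with
    | case1 b => intro _ _; exact List.IsChain.nil
    | case2 b c => intro _ _; exact List.IsChain.singleton c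
    | case3 c d t ih => intro _ hb; cases hb
    | case4 c d t hr ih =>
      intro h _
      rw [pvPass, if_pos hr] at h
      have := pvPass_length true t
      rw [h] at this
      simp only [List.length_cons] at this
      omega
    | case5 c d t hr ih =>
      intro h _
      rw [pvPass, if_neg hr] at h
      have h2 : pvPass false (d :: t) = d :: t := by
        injection h
      have hc := ih h2 rfl
      unfold PvChain at hc ⊢
      rw [List.isChain_cons_cons]
      exact ⟨Bool.not_eq_true _ ▸ (by simpa using hr), hc⟩
  exact fun l h => H false l h rfl

lemma pvEraseMid (pre rest : List Char) (x : Char) :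
    (pre ++ x :: rest).eraseIdx pre.length = pre ++ rest := by
  induction pre with
  | nil => simp
  | cons a t ih => simp [ih]

lemma pyGet_mid (pre rest : List Char) (x : Char) :
    PySem.List.pyGet? (pre ++ x :: rest) ((pre.length : Int)) = some x := by
  rw [PySem.List.pyGet?_natCast, List.getElem?_append_right (Nat.le_refl _)]
  simp

lemma pop_mid (pre rest : List Char) (x : Char) :
    PySem.List.pop? (pre ++ x :: rest) ((pre.length : Int)) = some (x, pre ++ rest) := by
  rw [PySem.List.pop?_natCast _ _ (by simp)]
  rw [List.getElem_append_right (Nat.le_refl _), pvEraseMid]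
  simp

lemma pvDeleteChars_nil (lp : List Char) : pvDeleteChars [] lp = lp := rfl

lemma pvDeleteChars_append (D E : List Int) (lp : List Char) :
    pvDeleteChars (D ++ E) lp = pvDeleteChars D (pvDeleteChars E lp) := by
  simp [pvDeleteChars, List.reverse_append, List.foldl_append]

lemma pvDeleteChars_pair (pre rest : List Char) (c d : Char) :
    pvDeleteChars [(pre.length : Int), (pre.length : Int) + 1] (pre ++ c :: d :: rest)
      = pre ++ rest := by
  have h1 : PySem.List.pop? (pre ++ c :: d :: rest) ((pre.length : Int) + 1)
      = some (d, pre ++ c :: rest) := by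
    have := pop_mid (pre ++ [c]) rest d
    simpa using this
  simp only [pvDeleteChars, List.reverse_cons, List.reverse_nil, List.nil_append,
    List.singleton_append, List.foldl_cons, List.foldl_nil, h1]
  rw [pop_mid pre rest c]

lemma pvGo_of_chain : ∀ (suf pre : List Char) (D : List Int), PvChain suf →
    pvGo (pre ++ suf) (PySem.List.enumerate suf (pre.length : Int)) D = D := by
  intro suf
  induction suf with
  | nil => intro pre D _; rw [PySem.List.enumerate_nil, pvGo]
  | cons c t ih =>
    intro pre D hch
    rw [PySem.List.enumerate_cons]
    cases t with
    | nil =>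
      rw [PySem.List.enumerate_nil]
      exact pvGo_break _ _ _ _ _ (by simp only [List.length_append, List.length_cons, List.length_nil]; push_cast; omega)
    | cons d t' =>
      have hg : PySem.List.pyGet? (pre ++ c :: d :: t') ((pre.length : Int) + 1) = some d := by
        have := pyGet_mid (pre ++ [c]) t' d
        simpa [add_assoc] using this
      rw [pvGo_step _ _ _ _ _ _ (by simp only [List.length_append, List.length_cons]; push_cast; omega) hg]
      have hcd : pvReactB c d = false := (List.isChain_cons_cons.mp hch).1
      rw [if_neg (by simp [hcd])]
      have := ih (pre ++ [c]) D hch.tail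
      simpa [add_assoc] using this

-- the key characterisation of one pass of A: collect + delete = pvPass
lemma pvGo_delete : ∀ (n : Nat) (suf pre : List Char) (D : List Int), suf.length ≤ n →
    (∀ e ∈ D, e < (pre.length : Int)) →
    pvDeleteChars (pvGo (pre ++ suf) (PySem.List.enumerate suf (pre.length : Int)) D) (pre ++ suf)
      = pvDeleteChars D (pre ++ pvPass (decide ((pre.length : Int) - 1 ∈ D)) suf) := by
  intro n
  induction n with
  | zero =>
    intro suf pre D hlen _
    have hs : suf = [] := List.eq_nil_of_length_eq_zero (Nat.le_zero.mp hlen)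
    subst hs
    rw [PySem.List.enumerate_nil, pvGo, pvPass]
  | succ n ih =>
    intro suf pre D hlen hD
    match suf with
    | [] => rw [PySem.List.enumerate_nil, pvGo, pvPass]
    | [c] =>
      rw [PySem.List.enumerate_cons, PySem.List.enumerate_nil,
        pvGo_break _ _ _ _ _ (by simp only [List.length_append, List.length_cons, List.length_nil]; push_cast; omega), pvPass]
    | c :: d :: t =>
      have hkD : ((pre.length : Int)) ∉ D := fun hmem => absurd (hD _ hmem) (by omega)
      have hg : PySem.List.pyGet? (pre ++ c :: d :: t) ((pre.length : Int) + 1) = some d := by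
        have := pyGet_mid (pre ++ [c]) t d
        simpa [add_assoc] using this
      rw [PySem.List.enumerate_cons, pvGo_step _ _ _ _ _ _ (by simp only [List.length_append, List.length_cons]; push_cast; omega) hg]
      by_cases hr : pvReactB c d = true
      · rw [if_pos hr]
        by_cases hb : ((pre.length : Int) - 1) ∈ D
        · -- blocked: this pair is skipped, the loop moves on with D unchanged
          rw [if_neg (by simpa using hb)]
          have hih := ih (d :: t) (pre ++ [c]) D (by simpa using Nat.le_of_succ_le_succ hlen)
            (fun e he => by have := hD e he; simp only [List.length_append, List.length_cons, List.length_nil]; push_cast; omega)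
          rw [(by simpa using hkD : (decide (((pre ++ [c]).length : Int) - 1 ∈ D)) = false)] at hih
          simp only [List.append_assoc, List.cons_append, List.nil_append] at hih
          rw [(by simp : (((pre ++ [c]).length : Int)) = (pre.length : Int) + 1)] at hih
          rw [hih, (by simpa using hb : (decide (((pre.length : Int)) - 1 ∈ D)) = true), pvPass]
        · -- the pair (k, k+1) is recorded for deletion
          rw [if_pos (by simpa using hb),
            (by simpa using hb : (decide (((pre.length : Int)) - 1 ∈ D)) = false)]
          rw [PySem.List.enumerate_cons]
          cases t with
          | nil =>
            rw [pvGo_break _ _ _ _ _ (by simp only [List.length_append, List.length_cons, List.length_nil]; push_cast; omega)]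
            rw [pvDeleteChars_append]
            have hp := pvDeleteChars_pair pre [] c d
            simp only [List.append_nil] at hp ⊢
            rw [hp, pvPass, if_pos hr, pvPass, List.append_nil]
          | cons e t' =>
            have hg2 : PySem.List.pyGet? (pre ++ c :: d :: e :: t') ((pre.length : Int) + 1 + 1)
                = some e := by
              have := pyGet_mid (pre ++ [c, d]) t' e
              simpa [add_assoc] using this
            rw [pvGo_step _ _ _ _ _ _ (by simp only [List.length_append, List.length_cons]; push_cast; omega) hg2]
            rw [(by simp : ((D ++ [(pre.length : Int), (pre.length : Int) + 1]).contains
                ((pre.length : Int) + 1 - 1)) = true)]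
            simp only [Bool.not_true, Bool.false_eq_true, if_false, ite_self]
            have hih := ih (e :: t') (pre ++ [c, d])
              (D ++ [(pre.length : Int), (pre.length : Int) + 1])
              (by simp at hlen ⊢; omega)
              (fun x hx => by
                simp only [List.mem_append, List.mem_cons, List.not_mem_nil, or_false] at hx
                rcases hx with hx | hx | hx
                · have := hD x hx
                  simp only [List.length_append, List.length_cons, List.length_nil]
                  push_cast; omega
                · subst hx
                  simp only [List.length_append, List.length_cons, List.length_nil]
                  push_cast; omega
                · subst hx
                  simp only [List.length_append, List.length_cons, List.length_nil]
                  push_cast; omega)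
            rw [(by simp only [List.length_append, List.length_cons, List.length_nil]; push_cast; omega :
              (((pre ++ [c, d]).length : Int)) = (pre.length : Int) + 1 + 1)] at hih
            have harith : ((pre.length : Int)) + 1 + 1 - 1 = ((pre.length : Int)) + 1 := by omega
            have hbl2 : (decide ((((pre.length : Int)) + 1 + 1 - 1)
                ∈ (D ++ [(pre.length : Int), (pre.length : Int) + 1]))) = true := by
              rw [harith]; simp
            rw [hbl2] at hih
            simp only [List.append_assoc, List.cons_append, List.nil_append] at hih
            rw [hih, pvDeleteChars_append]
            rw [pvDeleteChars_pair pre (pvPass true (e :: t')) c d, pvPass, if_pos hr]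
      · rw [if_neg hr]
        have hih := ih (d :: t) (pre ++ [c]) D (by simpa using Nat.le_of_succ_le_succ hlen)
          (fun e he => by have := hD e he; simp only [List.length_append, List.length_cons, List.length_nil]; push_cast; omega)
        rw [(by simpa using hkD : (decide (((pre ++ [c]).length : Int) - 1 ∈ D)) = false)] at hih
        simp only [List.append_assoc, List.cons_append, List.nil_append] at hih
        rw [(by simp : (((pre ++ [c]).length : Int)) = (pre.length : Int) + 1)] at hih
        rw [hih]
        by_cases hb : ((pre.length : Int) - 1) ∈ D
        · rw [(by simpa using hb : (decide (((pre.length : Int)) - 1 ∈ D)) = true), pvPass]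
        · rw [(by simpa using hb : (decide (((pre.length : Int)) - 1 ∈ D)) = false), pvPass,
            if_neg hr]

lemma pvCollect_delete (lp : List Char) :
    pvDeleteChars (pvGo lp (PySem.List.enumerate lp) []) lp = pvPass false lp := by
  have := pvGo_delete lp.length lp [] [] le_rfl (by simp)
  simpa [pvDeleteChars_nil] using this

lemma pvDelete_lt (lp : List Char) (h : pvGo lp (PySem.List.enumerate lp) [] ≠ []) :
    (pvDeleteChars (pvGo lp (PySem.List.enumerate lp) []) lp).length < lp.length := by
  rw [pvCollect_delete]
  rcases pvPass_eq_or_lt false lp with heq | hlt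
  · exfalso
    apply h
    have := pvGo_of_chain lp [] [] (pvPass_fix lp heq)
    simpa using this
  · exact hlt

lemma pvCharNatInj {a b : Char} (h : a.toNat = b.toNat) : a = b := by
  apply Char.ext; exact UInt32.toNat_inj.mp h

lemma pvCharLe (a b : Char) : (a ≤ b) ↔ (a.toNat ≤ b.toNat) := by
  rw [Char.le_def, UInt32.le_iff_toNat_le]; rfl

lemma pvLowNat (c : Char) : (PySem.Chars.lowerChar c).toNat =
    if 65 ≤ c.toNat ∧ c.toNat ≤ 90 then c.toNat + 32 else c.toNat := by
  simp only [PySem.Chars.lowerChar, PySem.Chars.isupper, pvCharLe, Bool.and_eq_true, decide_eq_true_eq]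
  have hA : ('A' : Char).toNat = 65 := rfl
  have hZ : ('Z' : Char).toNat = 90 := rfl
  rw [hA, hZ]
  by_cases h : 65 ≤ c.toNat ∧ c.toNat ≤ 90
  · rw [if_pos h, if_pos h, Char.toNat_ofNat, if_pos]
    exact Or.inl (by omega)
  · rw [if_neg h, if_neg h]

lemma pvReact_iff (a b : Char) : pvReactB a b = true ↔
    (PySem.Chars.lowerChar a = PySem.Chars.lowerChar b ∧ a ≠ b) := by
  simp only [pvReactB, Bool.and_eq_true, beq_iff_eq, bne_iff_ne]

lemma pvReact_toNat {c d : Char} (h : pvReactB c d = true) :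
    (65 ≤ c.toNat ∧ c.toNat ≤ 90 ∧ d.toNat = c.toNat + 32) ∨
    (97 ≤ c.toNat ∧ c.toNat ≤ 122 ∧ d.toNat + 32 = c.toNat) := by
  rw [pvReact_iff] at h
  obtain ⟨hL, hne⟩ := h
  have hL' := congrArg Char.toNat hL
  rw [pvLowNat, pvLowNat] at hL'
  have hne' : c.toNat ≠ d.toNat := fun hh => hne (pvCharNatInj hh)
  split_ifs at hL' <;> omega

lemma pvReact_unique {c d e : Char} (h1 : pvReactB c d = true) (h2 : pvReactB c e = true) :
    d = e := by
  rcases pvReact_toNat h1 with ⟨_, _, hd⟩ | ⟨_, _, hd⟩ <;>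
    rcases pvReact_toNat h2 with ⟨_, _, he⟩ | ⟨_, _, he⟩ <;>
    exact pvCharNatInj (by omega)

lemma pvReact_symm (a b : Char) : pvReactB a b = pvReactB b a := by
  rw [Bool.eq_iff_iff, pvReact_iff, pvReact_iff]
  exact ⟨fun ⟨x, y⟩ => ⟨x.symm, y.symm⟩, fun ⟨x, y⟩ => ⟨x.symm, y.symm⟩⟩

lemma pvPush_cons (t : Char) (r : List Char) (c : Char) :
    pvPush (t :: r) c = if pvReactB t c then r else c :: t :: r := by
  show (if t != c && (PySem.Chars.lowerChar t == PySem.Chars.lowerChar c) then r else c :: t :: r) = _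
  rw [Bool.and_comm]
  rfl

lemma pvPush_reduced {s : List Char} (hs : PvChain s) (c : Char) : PvChain (pvPush s c) := by
  cases s with
  | nil => exact List.IsChain.singleton c
  | cons t r =>
    rw [pvPush_cons]
    by_cases hr : pvReactB t c
    · rw [if_pos hr]; exact hs.tail
    · rw [if_neg hr]
      have hct : pvReactB c t = false := by
        rw [pvReact_symm]; exact Bool.not_eq_true _ ▸ (by simpa using hr)
      exact (List.isChain_cons_cons).mpr ⟨hct, hs⟩

lemma pvPush_push {s : List Char} (hs : PvChain s) {c d : Char} (h : pvReactB c d = true) :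
    pvPush (pvPush s c) d = s := by
  cases s with
  | nil =>
    show pvPush [c] d = []
    rw [pvPush_cons, if_pos h]
  | cons t r =>
    rw [pvPush_cons]
    by_cases htc : pvReactB t c
    · rw [if_pos htc]
      have hct : pvReactB c t = true := (pvReact_symm c t).trans htc
      have hdt : d = t := pvReact_unique h hct
      subst hdt
      cases r with
      | nil => rfl
      | cons u r' =>
        have htu : pvReactB d u = false := (List.isChain_cons_cons.mp hs).1
        have hud : pvReactB u d = false := (pvReact_symm u d).trans htu
        rw [pvPush_cons, if_neg (by simp [hud])]
    · rw [if_neg htc, pvPush_cons, if_pos h]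

lemma pvRun_pass : ∀ (b : Bool) (l : List Char), ∀ (s : List Char), PvChain s →
    List.foldl pvPush s (pvPass b l) = List.foldl pvPush s l := by
  intro b l
  induction b, l using pvPass.induct with
  | case1 b => intro s _; rw [pvPass]
  | case2 b c => intro s _; rw [pvPass]
  | case3 c d t ih =>
    intro s hs
    rw [pvPass]
    simp only [List.foldl_cons]
    exact ih (pvPush s c) (pvPush_reduced hs c)
  | case4 c d t hr ih =>
    intro s hs
    rw [pvPass, if_pos hr]
    rw [ih s hs]
    simp only [List.foldl_cons]
    rw [pvPush_push hs hr]
  | case5 c d t hr ih =>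
    intro s hs
    rw [pvPass, if_neg hr]
    simp only [List.foldl_cons]
    exact ih (pvPush s c) (pvPush_reduced hs c)

lemma pvRun_chain : ∀ (l : List Char), PvChain l → ∀ (s : List Char),
    (∀ a ∈ s.head?, ∀ b ∈ l.head?, pvReactB a b = false) →
    List.foldl pvPush s l = l.reverse ++ s := by
  intro l
  induction l with
  | nil => intro _ s _; simp
  | cons c t ih =>
    intro hl s hhead
    have hpush : pvPush s c = c :: s := by
      cases s with
      | nil => rfl
      | cons a r =>
        have hac : pvReactB a c = false := by
          have := hhead a (by simp) c (by simp)
          exact this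
        rw [pvPush_cons, if_neg (by simp [hac])]
    simp only [List.foldl_cons, hpush]
    rw [ih hl.tail (c :: s) ?_]
    · simp
    · intro a ha b hb
      simp only [List.head?_cons, Option.mem_some_iff] at ha
      subst ha
      cases t with
      | nil => simp at hb
      | cons b' t' =>
        simp only [List.head?_cons, Option.mem_some_iff] at hb
        subst hb
        exact (List.isChain_cons_cons.mp hl).1

lemma pvCore_eq : ∀ (fuel : Nat) (lp : List Char), lp.length < fuel →
    pvCore fuel lp = (lp.foldl pvPush []).reverse := by
  intro fuel
  induction fuel with
  | zero => intro lp h; omega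
  | succ fuel ih =>
    intro lp hlen
    rw [pvCore]
    by_cases h : (pvGo lp (PySem.List.enumerate lp) []).isEmpty
    · rw [if_pos h]
      have hfix : pvPass false lp = lp := by
        have := pvCollect_delete lp
        rw [List.isEmpty_iff.mp h, pvDeleteChars_nil] at this
        exact this.symm
      have hch := pvPass_fix lp hfix
      rw [pvRun_chain lp hch [] (by simp)]
      simp
    · rw [if_neg h]
      have hlt := pvDelete_lt lp (by simpa [List.isEmpty_iff] using h)
      rw [ih _ (by omega), pvCollect_delete]
      congr 1
      exact pvRun_pass false lp [] List.IsChain.nil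

-- ===== VERDICT (by name: the statement is the Claim_ definition above) =====
theorem reduce_polymer_spec : Claim_equal_reduce_polymer := by
  intro polymer _
  show _ = _
  unfold reduce_polymer reduce_polymer_alt
  rw [pvCore_eq _ _ (Nat.lt_succ_self _)]
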